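-- pv_equiv track=rewrite | github.com/SleepyCloud023/coding-test-study-note | Greedy/boj_1802/boj_1802.py | check_yes
-- ===== SOURCE A (Python) =====
-- def check_yes(input_string: str) -> bool:
--     if len(input_string) == 1:
--         return True
--     idx_center = len(input_string) // 2
--     for i in range(1, idx_center+1):
--         left = input_string[idx_center - i]
--         right = input_string[idx_center + i]
--         if left == right:
--             return False
--
--     return check_yes(input_string[:idx_center])
-- ===== SOURCE B (Python) =====
-- def check_yes(input_string: str) -> bool:
--     c = len(input_string) // 2
--     while c:
--         if any(a == b for a, b in zip(reversed(input_string[:c]),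
--                                       input_string[c + 1:2 * c + 1])):
--             return False
--         c //= 2
--     return True
-- ===== Notes on version B (the rewrite author's own statement) =====
-- stated objective: idiomatic
-- what changed: Replaces the recursion on string slices by a while loop over the chain of centers c = n//2, n//4, ..., and replaces the indexed pair-checking for-loop by zip(reversed(s[:c]), s[c+1:2*c+1]) with any(), the way an experienced Python developer would compare a left half against a right half.
import Mathlib
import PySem

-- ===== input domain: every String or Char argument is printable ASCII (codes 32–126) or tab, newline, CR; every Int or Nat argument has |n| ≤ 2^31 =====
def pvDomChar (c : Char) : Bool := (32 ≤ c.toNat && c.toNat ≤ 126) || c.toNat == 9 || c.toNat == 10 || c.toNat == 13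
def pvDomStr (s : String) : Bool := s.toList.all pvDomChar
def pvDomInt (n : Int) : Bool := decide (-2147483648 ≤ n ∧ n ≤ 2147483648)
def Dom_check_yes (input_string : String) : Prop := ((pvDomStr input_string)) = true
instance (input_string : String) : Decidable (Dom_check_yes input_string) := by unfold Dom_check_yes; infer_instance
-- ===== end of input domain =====

-- B replaces A's recursion on string slices by a while loop over the chain of centers
-- c = n//2, n//4, ..., and replaces the indexed pair-checking for-loop by
-- any over zip(reversed(s[:c]), s[c+1:2c+1]) (idiomatic; same cost).

-- ===== PORT A =====
-- recursion on the list of characters; s[:c] is PySem.List.slice; the '≤ 1' in the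
-- base test folds in the empty string only to make the function total (Python
-- recurses forever there, outside Pre_check_yes).
def check_yesGoA (l : List Char) : Bool :=
  if _h : l.length ≤ 1 then true
  else
    let c : Nat := l.length / 2
    if (PySem.List.pyRange 1 ((c : Int) + 1) 1).any (fun i =>
        PySem.List.pyGet? l ((c : Int) - i) == PySem.List.pyGet? l ((c : Int) + i)) then
      false
    else
      check_yesGoA (PySem.List.slice l none (some (c : Int)))
termination_by l.length
decreasing_by
  simp only [PySem.List.slice_to_natCast]
  simp [List.length_take]
  omega

def check_yes (input_string : String) : Bool :=
  check_yesGoA input_string.toList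

-- ===== PORT B =====
-- the while loop over the center c; per round, the pair check is
-- any(a == b for a, b in zip(reversed(s[:c]), s[c+1:2c+1])).
def check_yesGoB (l : List Char) (c : Nat) : Bool :=
  if c = 0 then true
  else if ((PySem.List.slice l none (some (c : Int))).reverse.zip
            (PySem.List.slice l (some ((c : Int) + 1)) (some (2 * (c : Int) + 1)))).any
          (fun p => p.1 == p.2) then false
  else check_yesGoB l (c / 2)
termination_by c
decreasing_by omega

def check_yes_alt (input_string : String) : Bool :=
  check_yesGoB input_string.toList (input_string.toList.length / 2)

-- ===== PRECONDITION & SPEC =====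
-- helpers for Pre_check_yes: the chain of prefix lengths A visits is m, m/2, m/4, …;
-- level t has length m / 2^t, center (m / 2^t) / 2, and its pair check can reach
-- index c + i only for i ≤ boundOf: c (odd length) or c - 1 (even length, where
-- i = c would read one past the prefix).
def boundOf (m : Nat) : Nat := if m % 2 = 0 then m / 2 - 1 else m / 2

def levelMatch (l : List Char) (c : Nat) (b : Nat) : Bool :=
  decide (∃ i < b + 1, 1 ≤ i ∧ l[c - i]? = l[c + i]?)

def chainOK (l : List Char) (m : Nat) : Bool :=
  decide (∀ t < m, ((m / 2 ^ t) % 2 = 0 ∧ 2 ≤ m / 2 ^ t) →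
    ∃ t' < t + 1, levelMatch l ((m / 2 ^ t') / 2) (boundOf (m / 2 ^ t')) = true)

-- Pre_ is exactly the set of inputs on which A returns: the nonempty strings such
-- that every even-length level of the halving chain is preceded (at that level or
-- an earlier one) by an in-range symmetric pair match; elsewhere A raises
-- IndexError at the even level (or RecursionError on the empty string).
def Pre_check_yes (input_string : String) : Prop :=
  input_string.toList ≠ [] ∧ chainOK input_string.toList input_string.toList.length = true
instance (input_string : String) : Decidable (Pre_check_yes input_string) := by
  unfold Pre_check_yes; infer_instance

def pvWitness_check_yes : String := "abc"

def Spec_check_yes (input_string : String) (out : Bool) : Prop := out = check_yes_alt input_string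
instance (input_string : String) (out : Bool) : Decidable (Spec_check_yes input_string out) := by unfold Spec_check_yes; infer_instance

-- ===== CLAIM (what is proved, stated in full; the proofs are below) =====
def Claim_equal_check_yes : Prop := ∀ (input_string : String), Dom_check_yes input_string → Pre_check_yes input_string → Spec_check_yes input_string (check_yes input_string)

-- ===== LEMMAS AND PROOFS =====

-- one-step unfolding of A's recursion past the length test (zeta-reduced)
lemma goA_step (l : List Char) (h : ¬ l.length ≤ 1) :
    check_yesGoA l =
      (if (PySem.List.pyRange 1 ((l.length / 2 : Nat) + 1 : Int) 1).any (fun i =>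
            PySem.List.pyGet? l (((l.length / 2 : Nat) : Int) - i) ==
              PySem.List.pyGet? l (((l.length / 2 : Nat) : Int) + i)) then false
        else check_yesGoA (PySem.List.slice l none (some ((l.length / 2 : Nat) : Int)))) := by
  conv_lhs => rw [check_yesGoA]
  rw [dif_neg h]

-- A's pair check on the prefix of length m decides LevelMatch at its level
lemma anyA_eq (l : List Char) (m : Nat) (h2 : 2 ≤ m) (hml : m ≤ l.length) :
    ((PySem.List.pyRange 1 ((m / 2 : Nat) + 1 : Int) 1).any (fun i =>
      PySem.List.pyGet? (l.take m) (((m / 2 : Nat) : Int) - i) ==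
        PySem.List.pyGet? (l.take m) (((m / 2 : Nat) : Int) + i)))
      = levelMatch l (m / 2) (boundOf m) := by
  apply Bool.eq_iff_iff.mpr
  rw [levelMatch, List.any_eq_true, decide_eq_true_iff]
  constructor
  · rintro ⟨i, hi, hterm⟩
    rw [PySem.List.mem_pyRange_one] at hi
    have h0l : (0:Int) ≤ ((m / 2 : Nat) : Int) - i := by omega
    have h0r : (0:Int) ≤ ((m / 2 : Nat) : Int) + i := by omega
    rw [PySem.List.pyGet?_of_nonneg _ h0l, PySem.List.pyGet?_of_nonneg _ h0r,
        List.getElem?_take, List.getElem?_take,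
        if_pos (by omega : (((m / 2 : Nat) : Int) - i).toNat < m)] at hterm
    by_cases hr : (((m / 2 : Nat) : Int) + i).toNat < m
    · rw [if_pos hr] at hterm
      have e1 : (((m / 2 : Nat) : Int) - i).toNat = m / 2 - i.toNat := by omega
      have e2 : (((m / 2 : Nat) : Int) + i).toNat = m / 2 + i.toNat := by omega
      rw [e1, e2] at hterm
      refine ⟨i.toNat, ?_, by omega, eq_of_beq hterm⟩
      unfold boundOf
      split <;> omega
    · rw [if_neg hr, List.getElem?_eq_getElem (by omega)] at hterm
      simp at hterm
  · rintro ⟨i, hib, hi1, heq⟩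
    have hbc : i ≤ m / 2 ∧ m / 2 + i < m := by
      unfold boundOf at hib
      split at hib <;> omega
    refine ⟨(i : Int), ?_, ?_⟩
    · rw [PySem.List.mem_pyRange_one]
      omega
    · rw [PySem.List.pyGet?_of_nonneg _ (by omega : (0:Int) ≤ ((m / 2 : Nat) : Int) - i),
          PySem.List.pyGet?_of_nonneg _ (by omega : (0:Int) ≤ ((m / 2 : Nat) : Int) + i)]
      have e1 : (((m / 2 : Nat) : Int) - (i : Int)).toNat = m / 2 - i := by omega
      have e2 : (((m / 2 : Nat) : Int) + (i : Int)).toNat = m / 2 + i := by omega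
      rw [e1, e2, List.getElem?_take, if_pos (by omega), List.getElem?_take,
          if_pos (by omega)]
      exact beq_iff_eq.mpr heq

-- B's zip-any is a match search over the in-range pairs
lemma anyB_spec (l : List Char) (c : Nat) :
    ((((PySem.List.slice l none (some (c : Int))).reverse.zip
        (PySem.List.slice l (some ((c : Int) + 1)) (some (2 * (c : Int) + 1)))).any
        (fun p => p.1 == p.2)) = true)
      ↔ ∃ i, 1 ≤ i ∧ i ≤ min c (l.length - c - 1) ∧ l[c - i]? = l[c + i]? := by
  have e1 : PySem.List.slice l none (some (c : Int)) = l.take c :=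
    PySem.List.slice_to_natCast l c
  have ec1 : ((c : Int) + 1) = ((c + 1 : Nat) : Int) := by push_cast; ring
  have ec2 : (2 * (c : Int) + 1) = ((2 * c + 1 : Nat) : Int) := by push_cast; ring
  have e2 : PySem.List.slice l (some ((c : Int) + 1)) (some (2 * (c : Int) + 1))
      = (l.drop (c + 1)).take c := by
    rw [ec1, ec2, PySem.List.slice_natCast, show 2 * c + 1 - (c + 1) = c from by omega]
  rw [e1, e2, List.any_eq_true]
  constructor
  · rintro ⟨x, hx, hpx⟩
    obtain ⟨k, hk, hxk⟩ := List.mem_iff_getElem.mp hx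
    subst hxk
    rw [List.length_zip, List.length_reverse, List.length_take, List.length_take,
        List.length_drop] at hk
    have hkc : k < c := by omega
    have hkn : k < l.length - c - 1 := by omega
    have hcn : c ≤ l.length := by omega
    rw [List.getElem_zip] at hpx
    simp only [List.getElem_reverse, List.length_take, List.getElem_take,
        List.getElem_drop] at hpx
    refine ⟨k + 1, by omega, by omega, ?_⟩
    rw [List.getElem?_eq_getElem (by omega), List.getElem?_eq_getElem (by omega)]
    have hv := eq_of_beq hpx
    have eL : l[c - (k + 1)] = l[min c l.length - 1 - k]'(by omega) := by
      apply getElem_congr rfl (by omega)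
    have eR : l[c + (k + 1)] = l[c + 1 + k]'(by omega) := by
      apply getElem_congr rfl (by omega)
    rw [eL, eR, hv]
  · rintro ⟨i, h1, h2, heq⟩
    have hcn : c + i + 1 ≤ l.length := by omega
    refine ⟨((l.take c).reverse.zip ((l.drop (c + 1)).take c))[i - 1]'?_, List.getElem_mem _, ?_⟩
    · rw [List.length_zip, List.length_reverse, List.length_take, List.length_take,
          List.length_drop]
      omega
    · rw [List.getElem_zip]
      simp only [List.getElem_reverse, List.length_take, List.getElem_take,
          List.getElem_drop]
      rw [List.getElem?_eq_getElem (by omega : c - i < l.length),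
          List.getElem?_eq_getElem (by omega : c + i < l.length)] at heq
      have heq2 := Option.some.inj heq
      apply beq_iff_eq.mpr
      have eL : l[min c l.length - 1 - (i - 1)]'(by omega) = l[c - i]'(by omega) := by
        apply getElem_congr rfl (by omega)
      have eR : l[c + 1 + (i - 1)]'(by omega) = l[c + i]'(by omega) := by
        apply getElem_congr rfl (by omega)
      rw [eL, eR, heq2]

lemma chainok_zero (l : List Char) (m : Nat) (h : chainOK l m = true) (h2 : 2 ≤ m)
    (he : m % 2 = 0) : levelMatch l (m / 2) (boundOf m) = true := by
  rw [chainOK, decide_eq_true_iff] at h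
  obtain ⟨t', ht', hm⟩ := h 0 (by omega) (by simpa using ⟨he, h2⟩)
  have : t' = 0 := by omega
  subst this
  simpa using hm

lemma chainok_step (l : List Char) (m : Nat) (h : chainOK l m = true)
    (hnm : ¬ levelMatch l (m / 2) (boundOf m) = true) : chainOK l (m / 2) = true := by
  rw [chainOK, decide_eq_true_iff] at h ⊢
  intro t ht hev
  have hdd : m / 2 / 2 ^ t = m / 2 ^ (t + 1) := by
    rw [Nat.div_div_eq_div_mul, pow_succ, mul_comm]
  rw [hdd] at hev
  have hle : 2 * 2 ^ (t + 1) ≤ m := by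
    have := (Nat.le_div_iff_mul_le (by positivity)).mp hev.2
    omega
  have hp : t + 1 < 2 ^ (t + 1) := Nat.lt_two_pow_self
  obtain ⟨t', ht', hm⟩ := h (t + 1) (by omega) hev
  match t' with
  | 0 =>
    simp at hm
    exact absurd hm hnm
  | (u + 1) =>
    refine ⟨u, by omega, ?_⟩
    have : m / 2 / 2 ^ u = m / 2 ^ (u + 1) := by
      rw [Nat.div_div_eq_div_mul, pow_succ, mul_comm]
    rw [this]
    exact hm

lemma goA_eq_goB (m : Nat) (l : List Char) (h1 : 1 ≤ m) (hml : m ≤ l.length)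
    (hch : chainOK l m = true) : check_yesGoA (l.take m) = check_yesGoB l (m / 2) := by
  induction m using Nat.strong_induction_on with
  | _ m ih =>
  have hlen : (l.take m).length = m := by rw [List.length_take]; omega
  by_cases hm1 : m = 1
  · subst hm1
    rw [check_yesGoA, check_yesGoB]
    simp [hlen]
  · have h2 : 2 ≤ m := by omega
    have hc1 : 1 ≤ m / 2 := by omega
    rw [goA_step (l.take m) (by rw [hlen]; omega)]
    simp only [hlen]
    rw [anyA_eq l m h2 hml]
    rw [check_yesGoB, if_neg (by omega : ¬ m / 2 = 0)]
    by_cases he : m % 2 = 0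
    · have hLM := chainok_zero l m hch h2 he
      have hBany : (((PySem.List.slice l none (some ((m / 2 : Nat) : Int))).reverse.zip
            (PySem.List.slice l (some (((m / 2 : Nat) : Int) + 1))
              (some (2 * ((m / 2 : Nat) : Int) + 1)))).any (fun p => p.1 == p.2)) = true := by
        apply (anyB_spec l (m / 2)).mpr
        rw [levelMatch, decide_eq_true_iff] at hLM
        obtain ⟨i, hib, hi1, heq⟩ := hLM
        have hbo : boundOf m = m / 2 - 1 := by unfold boundOf; simp [he]
        rw [hbo] at hib
        exact ⟨i, hi1, by omega, heq⟩
      rw [if_pos hLM, if_pos hBany]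
    · have hbo : boundOf m = m / 2 := by unfold boundOf; simp [he]
      have hmin : min (m / 2) (l.length - m / 2 - 1) = m / 2 := by omega
      have hB : (((PySem.List.slice l none (some ((m / 2 : Nat) : Int))).reverse.zip
            (PySem.List.slice l (some (((m / 2 : Nat) : Int) + 1))
              (some (2 * ((m / 2 : Nat) : Int) + 1)))).any (fun p => p.1 == p.2))
          = levelMatch l (m / 2) (boundOf m) := by
        apply Bool.eq_iff_iff.mpr
        rw [anyB_spec, levelMatch, decide_eq_true_iff, hmin, hbo]
        constructor
        · rintro ⟨i, hi1, hi2, heq⟩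
          exact ⟨i, by omega, hi1, heq⟩
        · rintro ⟨i, hib, hi1, heq⟩
          exact ⟨i, hi1, by omega, heq⟩
      rw [hB]
      by_cases hP : levelMatch l (m / 2) (boundOf m) = true
      · rw [if_pos hP, if_pos hP]
      · rw [if_neg hP, if_neg hP]
        rw [PySem.List.slice_to_natCast, List.take_take, min_eq_left (by omega : m / 2 ≤ m)]
        exact ih (m / 2) (by omega) hc1 (by omega) (chainok_step l m hch hP)

-- ===== VERDICT (by name: the statement is the Claim_ definition above) =====
theorem check_yes_spec : Claim_equal_check_yes := by
  intro s _hdom hpre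
  obtain ⟨hne, hch⟩ := hpre
  unfold Spec_check_yes check_yes check_yes_alt
  have h1 : 1 ≤ s.toList.length := List.length_pos_of_ne_nil hne
  have := goA_eq_goB s.toList.length s.toList h1 le_rfl hch
  rwa [List.take_length] at this
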